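-- pv_equiv track=rewrite | github.com/AlfredT15/CSC436 | ProgrammingAssignment/find_candidate_key.py | findCD
-- ===== SOURCE A (Python) =====
-- def findCD(relation: set, potentialkeys: list, FD: list):
--     """Finds candidate keys
--
--     :param relation: set of relations
--     :type relation: set
--     :param potentialkeys: list of all potential keys
--     :type potentialkeys: list
--     :param FD: list of functional dependencies
--     :type FD: list
--     :return: list of candidate keys
--     :rtype: list
--     """
--     cd = []
--     # go through evert potential key and get its closure
--     while len(potentialkeys) > 0:
--         closureLHS = potentialkeys.pop(0)
--         closureRHS = closureLHS.copy()
--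
--         # this loop is here for whenever the closure gets updated, go through the list of FD again
--         changed = True
--         while changed == True:
--             changed = False
--             for fd in FD:
--                 if fd[0].issubset(closureRHS) and (fd[1].issubset(closureRHS)) == False:
--                     closureRHS = closureRHS.union(fd[1])
--                     changed = True
--
--             if closureRHS == relation:
--                 cd.append(closureLHS)
--
--                 # for removing any possible superkeys that has the candidate key as a subset
--                 removeList = []
--                 for subset in potentialkeys:
--                     if closureLHS.issubset(subset):
--                         removeList.append(subset)
--
--                 # if i tried to remove the subsets in the above loop, it will perform weirdly and miss some subsets
--                 for t in removeList:
--                     potentialkeys.remove(t)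
--
--                 break
--     return cd
-- ===== SOURCE B (Python) =====
-- # B: one pass per round over only the still-unsatisfied FDs (satisfied FDs are dropped
-- # for good), and superkeys are skipped by a subset test against the found candidates
-- # instead of A's collect-and-remove mutation of potentialkeys.  Return value only:
-- # A empties the potentialkeys list in place, B leaves it untouched.
-- def findCD(relation: set, potentialkeys: list, FD: list):
--     cd = []
--     for key in potentialkeys:
--         if any(c.issubset(key) for c in cd):
--             continue
--         closure = set(key)
--         pending = list(FD)
--         while True:
--             changed = False
--             rest = []
--             for fd in pending:
--                 if fd[0].issubset(closure):
--                     if not fd[1].issubset(closure):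
--                         closure = closure.union(fd[1])
--                         changed = True
--                 else:
--                     rest.append(fd)
--             pending = rest
--             if closure == relation:
--                 cd.append(key)
--                 break
--             if not changed:
--                 break
--     return cd
-- ===== Notes on version B (the rewrite author's own statement) =====
-- stated objective: alternative
-- what changed: B's closure loop permanently discards each functional dependency once its RHS is in the closure (so later rounds rescan only the still-pending FDs) and the outer loop skips superkeys by testing each key against the found candidates, replacing A's collect-and-remove mutation of potentialkeys.
import Mathlib
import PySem

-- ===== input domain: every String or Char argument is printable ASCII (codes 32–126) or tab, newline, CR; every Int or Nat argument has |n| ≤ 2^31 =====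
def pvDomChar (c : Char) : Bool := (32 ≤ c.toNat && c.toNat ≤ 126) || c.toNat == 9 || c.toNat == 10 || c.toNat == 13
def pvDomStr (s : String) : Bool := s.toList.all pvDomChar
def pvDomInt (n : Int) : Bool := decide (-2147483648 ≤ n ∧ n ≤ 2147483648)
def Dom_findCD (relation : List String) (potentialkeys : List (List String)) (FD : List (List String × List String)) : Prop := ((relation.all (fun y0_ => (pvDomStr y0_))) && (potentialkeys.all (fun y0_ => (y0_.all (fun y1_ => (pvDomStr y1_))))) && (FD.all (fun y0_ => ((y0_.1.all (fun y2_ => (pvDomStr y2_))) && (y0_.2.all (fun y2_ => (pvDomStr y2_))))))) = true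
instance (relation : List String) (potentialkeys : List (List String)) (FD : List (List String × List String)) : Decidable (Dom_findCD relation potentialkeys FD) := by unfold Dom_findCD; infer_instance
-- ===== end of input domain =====

-- B drops each functional dependency for good once satisfied (instead of rescanning the full FD
-- list every round) and skips superkeys by a subset test against the found candidates (instead of
-- A's collect-and-remove mutation); return value only: A empties potentialkeys in place, B does not.


-- ===== PORT A =====
-- A's inner 'for fd in FD' pass; state = (closureRHS, changed)
def pvPassA (FD : List (List String × List String)) (st : List String × Bool) : List String × Bool :=
  FD.foldl (fun acc fd =>
    if PySem.Set.issubset fd.1 acc.1 && !(PySem.Set.issubset fd.2 acc.1) then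
      (PySem.Set.union acc.1 fd.2, true)
    else acc) st

-- termination measure for A's 'while changed' loop: FDs whose RHS is not yet inside the closure
def pvUnsat (FD : List (List String × List String)) (S : List String) : Nat :=
  (FD.filter (fun fd => !(PySem.Set.issubset fd.2 S))).length

lemma pvPassA_mem (FD : List (List String × List String)) (st : List String × Bool)
    (x : String) (hx : x ∈ st.1) : x ∈ (pvPassA FD st).1 := by
  induction FD generalizing st with
  | nil => exact hx
  | cons fd t ih =>
    simp only [pvPassA, List.foldl_cons] at *
    split
    · exact ih _ (by simp [PySem.Set.mem_union]; exact Or.inl hx)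
    · exact ih _ hx

lemma pvPassA_sat (FD : List (List String × List String)) (st : List String × Bool)
    (t : List String) (h : PySem.Set.issubset t st.1 = true) :
    PySem.Set.issubset t (pvPassA FD st).1 = true := by
  rw [PySem.Set.issubset_iff] at h ⊢
  exact fun x hx => pvPassA_mem FD st x (h x hx)

lemma pvPassA_changed (FD : List (List String × List String)) (S : List String) (ch : Bool)
    (h : (pvPassA FD (S, ch)).2 = true) :
    ch = true ∨ ∃ fd ∈ FD, PySem.Set.issubset fd.2 S = false ∧
      PySem.Set.issubset fd.2 (pvPassA FD (S, ch)).1 = true := by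
  induction FD generalizing S ch with
  | nil => exact Or.inl h
  | cons fd t ih =>
    simp only [pvPassA, List.foldl_cons] at h ⊢
    by_cases hc : (PySem.Set.issubset fd.1 S && !(PySem.Set.issubset fd.2 S)) = true
    · rw [if_pos hc] at h ⊢
      refine Or.inr ⟨fd, by simp, ?_, ?_⟩
      · simp only [Bool.and_eq_true, Bool.not_eq_true'] at hc; exact hc.2
      · apply pvPassA_sat
        rw [PySem.Set.issubset_iff]
        intro x hx
        simp [PySem.Set.mem_union]
        exact Or.inr hx
    · rw [if_neg hc] at h ⊢
      rcases ih S ch h with h' | ⟨fd', hmem, h1, h2⟩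
      · exact Or.inl h'
      · exact Or.inr ⟨fd', by simp [hmem], h1, h2⟩

lemma pvCountP_lt {α : Type} (l : List α) (p q : α → Bool)
    (hmono : ∀ a ∈ l, q a → p a) (a0 : α) (h0 : a0 ∈ l) (hp : p a0 = true) (hq : q a0 = false) :
    l.countP q < l.countP p := by
  induction l with
  | nil => cases h0
  | cons x t ih =>
    rw [List.countP_cons, List.countP_cons]
    have hmt : ∀ a ∈ t, q a = true → p a = true := fun a ha h => hmono a (by simp [ha]) h
    have hle : t.countP q ≤ t.countP p := List.countP_mono_left hmt
    by_cases hx : x = a0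
    · subst hx; rw [hp, hq]; simp; omega
    · rcases List.mem_cons.mp h0 with h | h
      · exact absurd h.symm hx
      · have ht := ih hmt h
        cases hqx : q x
        · cases hpx : p x <;> simp <;> omega
        · rw [hmono x (by simp) hqx]; simpa using ht

lemma pvUnsat_lt (FD : List (List String × List String)) (S : List String)
    (h : (pvPassA FD (S, false)).2 = true) :
    pvUnsat FD (pvPassA FD (S, false)).1 < pvUnsat FD S := by
  rcases pvPassA_changed FD S false h with h' | ⟨fd0, hmem, h1, h2⟩
  · cases h'
  · unfold pvUnsat
    rw [← List.countP_eq_length_filter, ← List.countP_eq_length_filter]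
    apply pvCountP_lt
    · intro fd _ hq
      simp only [Bool.not_eq_true'] at hq ⊢
      by_contra hc
      simp only [Bool.not_eq_false] at hc
      rw [pvPassA_sat FD (S, false) fd.2 hc] at hq
      cases hq
    · exact hmem
    · simp [h1]
    · simp [h2]

-- A's inner 'while changed' loop: returns True iff the key is appended to cd
def pvLoopA (relation : List String) (FD : List (List String × List String)) (S : List String) : Bool :=
  let st := pvPassA FD (S, false)
  if PySem.Set.equal st.1 relation then true
  else if h : st.2 = true then pvLoopA relation FD st.1
  else false
termination_by pvUnsat FD S
decreasing_by exact pvUnsat_lt FD S h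

-- 'for t in removeList: potentialkeys.remove(t)'
def pvRemoveAll (pk ts : List (List String)) : List (List String) :=
  ts.foldl (fun l t => (PySem.List.remove? l t).getD l) pk

lemma pvRemoveAll_step (l : List (List String)) (t : List String) :
    ((PySem.List.remove? l t).getD l).length ≤ l.length := by
  by_cases hm : t ∈ l
  · rw [PySem.List.remove?_eq_some_erase l t hm]
    simp [List.length_erase]
    split <;> omega
  · rw [(PySem.List.remove?_eq_none_iff l t).mpr hm]
    simp

lemma pvRemoveAll_length (ts pk : List (List String)) : (pvRemoveAll pk ts).length ≤ pk.length := by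
  induction ts generalizing pk with
  | nil => simp [pvRemoveAll]
  | cons t ts ih =>
    simp only [pvRemoveAll, List.foldl_cons]
    exact le_trans (ih _) (pvRemoveAll_step pk t)

-- A's outer 'while len(potentialkeys) > 0' loop, popping the head
def pvGoA (relation : List String) (FD : List (List String × List String))
    (pk cd : List (List String)) : List (List String) :=
  match pk with
  | [] => cd
  | k :: rest =>
    if pvLoopA relation FD k then
      pvGoA relation FD
        (pvRemoveAll rest (rest.foldl (fun acc s => if PySem.Set.issubset k s then acc ++ [s] else acc) []))
        (cd ++ [k])
    else pvGoA relation FD rest cd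
termination_by pk.length
decreasing_by
  · exact Nat.lt_succ_of_le (pvRemoveAll_length _ _)
  · simp

def findCD (relation : List String) (potentialkeys : List (List String)) (FD : List (List String × List String)) : List (List String) :=
  pvGoA relation FD potentialkeys []

-- ===== PORT B =====
-- B's pass over the still-pending FDs; state = (closure, rest, changed)
def pvPassB (pending : List (List String × List String))
    (st : List String × List (List String × List String) × Bool) :
    List String × List (List String × List String) × Bool :=
  pending.foldl (fun acc fd =>
    if PySem.Set.issubset fd.1 acc.1 then
      if !(PySem.Set.issubset fd.2 acc.1) then (PySem.Set.union acc.1 fd.2, acc.2.1, true) else acc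
    else (acc.1, acc.2.1 ++ [fd], acc.2.2)) st

lemma pvPassB_len (pending : List (List String × List String))
    (st : List String × List (List String × List String) × Bool) :
    (pvPassB pending st).2.1.length ≤ st.2.1.length + pending.length ∧
    ((pvPassB pending st).2.2 = true → st.2.2 = true ∨
      (pvPassB pending st).2.1.length < st.2.1.length + pending.length) := by
  induction pending generalizing st with
  | nil => simp [pvPassB]
  | cons fd t ih =>
    simp only [pvPassB, List.foldl_cons] at *
    by_cases h1 : PySem.Set.issubset fd.1 st.1 = true
    · rw [if_pos h1]
      by_cases h2 : (!(PySem.Set.issubset fd.2 st.1)) = true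
      · rw [if_pos h2]
        rcases ih (PySem.Set.union st.1 fd.2, st.2.1, true) with ⟨hle, _⟩
        dsimp only at hle
        simp only [List.length_cons]
        exact ⟨by omega, fun _ => Or.inr (by omega)⟩
      · rw [if_neg h2]
        rcases ih st with ⟨hle, hlt⟩
        simp only [List.length_cons]
        refine ⟨by omega, fun hch => ?_⟩
        rcases hlt hch with h | h
        · exact Or.inl h
        · exact Or.inr (by omega)
    · rw [if_neg h1]
      rcases ih (st.1, st.2.1 ++ [fd], st.2.2) with ⟨hle, hlt⟩
      dsimp only at hle hlt
      simp only [List.length_append, List.length_cons, List.length_nil] at *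
      refine ⟨by omega, fun hch => ?_⟩
      rcases hlt hch with h | h
      · exact Or.inl h
      · exact Or.inr (by omega)

-- B's 'while True' closure loop over the shrinking pending list
def pvLoopB (relation : List String) (pending : List (List String × List String)) (S : List String) : Bool :=
  let st := pvPassB pending (S, [], false)
  if PySem.Set.equal st.1 relation then true
  else if h : st.2.2 = true then pvLoopB relation st.2.1 st.1
  else false
termination_by pending.length
decreasing_by
  rcases pvPassB_len pending (S, [], false) with ⟨hle, hlt⟩
  rcases hlt h with h' | h'
  · exact absurd h' (by simp)
  · simpa using h'

def findCD_alt (relation : List String) (potentialkeys : List (List String)) (FD : List (List String × List String)) : List (List String) :=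
  potentialkeys.foldl (fun cd key =>
    if cd.any (fun c => PySem.Set.issubset c key) then cd
    else if pvLoopB relation FD key then cd ++ [key] else cd) []

-- ===== PRECONDITION & SPEC =====
def Spec_findCD (relation : List String) (potentialkeys : List (List String)) (FD : List (List String × List String)) (out : List (List String)) : Prop := out = findCD_alt relation potentialkeys FD
instance (relation : List String) (potentialkeys : List (List String)) (FD : List (List String × List String)) (out : List (List String)) : Decidable (Spec_findCD relation potentialkeys FD out) := by unfold Spec_findCD; infer_instance

-- ===== CLAIM (what is proved, stated in full; the proofs are below) =====
def Claim_equal_findCD : Prop := ∀ (relation : List String) (potentialkeys : List (List String)) (FD : List (List String × List String)), Dom_findCD relation potentialkeys FD → Spec_findCD relation potentialkeys FD (findCD relation potentialkeys FD)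

-- ===== LEMMAS AND PROOFS =====

-- 'pending is FD with some fds whose RHS already lies inside S deleted'
inductive pvDrops : List (List String × List String) → List (List String × List String) → List String → Prop
  | nil (S : List String) : pvDrops [] [] S
  | keep {t t' : List (List String × List String)} {S : List String} (fd : List String × List String)
      (h : pvDrops t t' S) : pvDrops (fd :: t) (fd :: t') S
  | drop {t pending : List (List String × List String)} {S : List String} (fd : List String × List String)
      (hsat : PySem.Set.issubset fd.2 S = true) (h : pvDrops t pending S) : pvDrops (fd :: t) pending S

lemma pvDrops_refl (l : List (List String × List String)) (S : List String) : pvDrops l l S := by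
  induction l with
  | nil => exact pvDrops.nil S
  | cons fd t ih => exact pvDrops.keep fd ih

lemma pvDrops_mono {FDl pending : List (List String × List String)} {S S' : List String}
    (h : pvDrops FDl pending S) (hsub : ∀ x ∈ S, x ∈ S') : pvDrops FDl pending S' := by
  induction h with
  | nil => exact pvDrops.nil S'
  | keep fd _ ih => exact pvDrops.keep fd (ih hsub)
  | drop fd hsat _ ih =>
      refine pvDrops.drop fd ?_ (ih hsub)
      rw [PySem.Set.issubset_iff] at hsat ⊢
      exact fun x hx => hsub x (hsat x hx)

lemma pvPassB_rest (pending : List (List String × List String)) :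
    ∀ (S : List String) (rest0 : List (List String × List String)) (ch : Bool),
    pvPassB pending (S, rest0, ch) =
      ((pvPassB pending (S, [], ch)).1,
       rest0 ++ (pvPassB pending (S, [], ch)).2.1,
       (pvPassB pending (S, [], ch)).2.2) := by
  induction pending with
  | nil => intro S rest0 ch; simp [pvPassB]
  | cons fd t ih =>
    intro S rest0 ch
    simp only [pvPassB, List.foldl_cons] at *
    by_cases h1 : PySem.Set.issubset fd.1 S = true
    · rw [if_pos h1, if_pos h1]
      by_cases h2 : (!(PySem.Set.issubset fd.2 S)) = true
      · rw [if_pos h2, if_pos h2]; exact ih _ _ _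
      · rw [if_neg h2, if_neg h2]; exact ih _ _ _
    · rw [if_neg h1, if_neg h1]
      simp only [List.nil_append]
      rw [ih S (rest0 ++ [fd]) ch, ih S [fd] ch]
      simp

lemma pvPassA_cons (fd : List String × List String) (t : List (List String × List String))
    (st : List String × Bool) :
    pvPassA (fd :: t) st = pvPassA t
      (if PySem.Set.issubset fd.1 st.1 && !(PySem.Set.issubset fd.2 st.1) then
        (PySem.Set.union st.1 fd.2, true) else st) := rfl

lemma pvPassB_cons (fd : List String × List String) (t : List (List String × List String))
    (st : List String × List (List String × List String) × Bool) :
    pvPassB (fd :: t) st = pvPassB t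
      (if PySem.Set.issubset fd.1 st.1 then
        (if !(PySem.Set.issubset fd.2 st.1) then (PySem.Set.union st.1 fd.2, st.2.1, true) else st)
      else (st.1, st.2.1 ++ [fd], st.2.2)) := rfl

lemma pvPass_equiv : ∀ (FDl pending : List (List String × List String)) (S : List String) (ch : Bool),
    pvDrops FDl pending S →
    (pvPassA FDl (S, ch)).1 = (pvPassB pending (S, [], ch)).1 ∧
    (pvPassA FDl (S, ch)).2 = (pvPassB pending (S, [], ch)).2.2 ∧
    pvDrops FDl (pvPassB pending (S, [], ch)).2.1 (pvPassA FDl (S, ch)).1 := by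
  intro FDl
  induction FDl with
  | nil =>
    intro pending S ch h
    cases h
    exact ⟨rfl, rfl, pvDrops.nil S⟩
  | cons fd t ih =>
    intro pending S ch h
    cases h with
    | keep _ h' =>
      rename_i t'
      rw [pvPassA_cons, pvPassB_cons]
      by_cases h1 : PySem.Set.issubset fd.1 S = true
      · by_cases h2 : (!(PySem.Set.issubset fd.2 S)) = true
        · -- fires in both
          rw [if_pos (by simp only [h1, Bool.true_and]; exact h2), if_pos h1, if_pos h2]
          dsimp only
          have hmono : ∀ x ∈ S, x ∈ PySem.Set.union S fd.2 := by
            intro x hx; rw [PySem.Set.mem_union]; exact Or.inl hx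
          rcases ih t' (PySem.Set.union S fd.2) true (pvDrops_mono h' hmono) with ⟨e1, e2, hd⟩
          refine ⟨e1, e2, pvDrops.drop fd ?_ hd⟩
          apply pvPassA_sat
          rw [PySem.Set.issubset_iff]
          intro x hx
          rw [PySem.Set.mem_union]
          exact Or.inr hx
        · -- lhs inside, rhs already inside: both skip
          rw [if_neg (by simp only [h1, Bool.true_and]; exact h2), if_pos h1, if_neg h2]
          rcases ih t' S ch h' with ⟨e1, e2, hd⟩
          refine ⟨e1, e2, pvDrops.drop fd ?_ hd⟩
          exact pvPassA_sat t (S, ch) fd.2 (by simpa using h2)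
      · -- lhs not inside: A skips, B keeps
        rw [if_neg (by simp [h1]), if_neg h1]
        dsimp only
        rcases ih t' S ch h' with ⟨e1, e2, hd⟩
        rw [pvPassB_rest t' S ([] ++ [fd]) ch]
        simp only [List.nil_append]
        exact ⟨e1, e2, pvDrops.keep fd hd⟩
    | drop f3 hs hrec =>
      rw [pvPassA_cons]
      rw [if_neg (by simp [hs])]
      rcases ih pending S ch hrec with ⟨e1, e2, hd⟩
      refine ⟨e1, e2, pvDrops.drop fd ?_ hd⟩
      exact pvPassA_sat t (S, ch) fd.2 hs

lemma pvLoop_equiv_aux (relation : List String) (FDl : List (List String × List String)) :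
    ∀ (n : Nat) (S : List String) (pending : List (List String × List String)),
    pvUnsat FDl S ≤ n → pvDrops FDl pending S →
    pvLoopA relation FDl S = pvLoopB relation pending S := by
  intro n
  induction n with
  | zero =>
    intro S pending hn hd
    rw [pvLoopA, pvLoopB]
    rcases pvPass_equiv FDl pending S false hd with ⟨e1, e2, _⟩
    simp only [← e1, ← e2]
    split
    · rfl
    · split
      · rename_i hch
        exact absurd (pvUnsat_lt FDl S hch) (by omega)
      · rfl
  | succ n ih =>
    intro S pending hn hd
    rw [pvLoopA, pvLoopB]
    rcases pvPass_equiv FDl pending S false hd with ⟨e1, e2, hd'⟩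
    simp only [← e1, ← e2]
    split
    · rfl
    · split
      · rename_i hch
        have hlt := pvUnsat_lt FDl S hch
        exact ih (pvPassA FDl (S, false)).1 _ (by omega) hd'
      · rfl

lemma pvLoop_equiv (relation : List String) (FDl : List (List String × List String))
    (S : List String) (hd : pvDrops FDl FDl S) :
    pvLoopA relation FDl S = pvLoopB relation FDl S :=
  pvLoop_equiv_aux relation FDl (pvUnsat FDl S) S FDl le_rfl hd

lemma pvRemoveAll_cons_ne (ts : List (List String)) :
    ∀ (l : List (List String)) (x : List String), (∀ t ∈ ts, t ≠ x) →
    pvRemoveAll (x :: l) ts = x :: pvRemoveAll l ts := by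
  induction ts with
  | nil => intro l x _; rfl
  | cons t ts ih =>
    intro l x hne
    simp only [pvRemoveAll, List.foldl_cons] at *
    have hxt : x ≠ t := fun h => (hne t (by simp)) h.symm
    rw [PySem.List.remove?_cons_of_ne _ hxt]
    have hne' : ∀ u ∈ ts, u ≠ x := fun u hu => hne u (by simp [hu])
    cases hr : PySem.List.remove? l t with
    | none => simpa using ih l x hne'
    | some r => simpa using ih r x hne'

lemma pvRemoveAll_filter (l : List (List String)) (Q : List String → Bool) :
    pvRemoveAll l (l.filter Q) = l.filter (fun x => !(Q x)) := by
  induction l with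
  | nil => rfl
  | cons x t ih =>
    cases hq : Q x
    · have h1 : List.filter Q (x :: t) = List.filter Q t := by simp [hq]
      have h2 : List.filter (fun y => !(Q y)) (x :: t) = x :: List.filter (fun y => !(Q y)) t := by
        simp [hq]
      rw [h1, h2, pvRemoveAll_cons_ne _ t x (fun u hu => fun he => by
        have := List.of_mem_filter hu
        rw [he, hq] at this; cases this), ih]
    · have h1 : List.filter Q (x :: t) = x :: List.filter Q t := by simp [hq]
      have h2 : List.filter (fun y => !(Q y)) (x :: t) = List.filter (fun y => !(Q y)) t := by
        simp [hq]
      rw [h1, h2]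
      show pvRemoveAll (x :: t) (x :: t.filter Q) = t.filter (fun y => !(Q y))
      simp only [pvRemoveAll, List.foldl_cons, PySem.List.remove?_cons_self, Option.getD_some]
      exact ih

lemma pvGoA_foldl (relation : List String) (FD : List (List String × List String)) :
    ∀ (rem cd : List (List String)),
    pvGoA relation FD (rem.filter (fun k => !(cd.any (fun c => PySem.Set.issubset c k)))) cd =
      rem.foldl (fun cd key =>
        if cd.any (fun c => PySem.Set.issubset c key) then cd
        else if pvLoopB relation FD key then cd ++ [key] else cd) cd := by
  intro rem
  induction rem with
  | nil =>
    intro cd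
    simp only [List.filter_nil, List.foldl_nil]
    rw [pvGoA]
  | cons k rem ih =>
    intro cd
    rw [List.foldl_cons]
    cases hP : cd.any (fun c => PySem.Set.issubset c k)
    · -- k survives the filter
      have hf : (k :: rem).filter (fun k => !(cd.any (fun c => PySem.Set.issubset c k))) =
          k :: rem.filter (fun k => !(cd.any (fun c => PySem.Set.issubset c k))) := by
        simp [hP]
      rw [hf, pvGoA, pvLoop_equiv relation FD k (pvDrops_refl FD k)]
      cases hL : pvLoopB relation FD k
      · simp only [Bool.false_eq_true, if_false]
        exact ih cd
      · simp only [if_true]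
        rw [PySem.List.foldl_append_if_eq_filter, List.nil_append, pvRemoveAll_filter,
          List.filter_filter]
        have hcong : ∀ x ∈ rem,
            ((!(PySem.Set.issubset k x)) && !(cd.any (fun c => PySem.Set.issubset c x))) =
            (!((cd ++ [k]).any (fun c => PySem.Set.issubset c x))) := by
          intro x _
          rw [List.any_append]
          simp [Bool.not_or, Bool.and_comm]
        rw [List.filter_congr hcong]
        exact ih (cd ++ [k])
    · -- k is filtered out
      have hf : (k :: rem).filter (fun k => !(cd.any (fun c => PySem.Set.issubset c k))) =
          rem.filter (fun k => !(cd.any (fun c => PySem.Set.issubset c k))) := by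
        simp [hP]
      rw [hf, ih cd]
      simp

-- ===== VERDICT (by name: the statement is the Claim_ definition above) =====
theorem findCD_spec : Claim_equal_findCD := by
  intro relation potentialkeys FD _
  unfold Spec_findCD findCD findCD_alt
  have h := pvGoA_foldl relation FD potentialkeys []
  simpa using h
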